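-- pv_equiv track=rewrite | github.com/s7sundar/NewTest | app.py | group_spikes_into_events
-- ===== SOURCE A (Python) =====
-- from typing import List, Dict, Optional
--
-- def group_spikes_into_events(spike_indices: List[int], max_gap: int = 3, n_total: int = None) -> List[Dict]:
--     """Group consecutive/nearby spikes into events.
--
--     For very short data (weekly aggregates), use smaller max_gap
--     to preserve distinct event patterns.
--     """
--     if not spike_indices:
--         return []
--
--     # Adjust max_gap based on data length
--     if n_total is not None:
--         if n_total < 20:  # Weekly data (< 20 weeks)
--             max_gap = 1   # Only group truly adjacent
--         elif n_total < 30: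
--             max_gap = min(max_gap, 2)
--
--     events = []
--     current = {"start": spike_indices[0], "end": spike_indices[0]}
--
--     for idx in spike_indices[1:]:
--         if idx - current["end"] <= max_gap:
--             current["end"] = idx
--         else:
--             current["duration"] = current["end"] - current["start"] + 1
--             events.append(current)
--             current = {"start": idx, "end": idx}
--
--     current["duration"] = current["end"] - current["start"] + 1
--     events.append(current)
--
--     return events
-- ===== SOURCE B (Python) =====
-- def group_spikes_into_events(spike_indices, max_gap=3, n_total=None):
--     """Group consecutive/nearby spikes into events (run-scanning formulation)."""
--     if not spike_indices:
--         return []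
--     if n_total is not None:
--         if n_total < 20:
--             max_gap = 1
--         elif n_total < 30:
--             max_gap = min(max_gap, 2)
--     events = []
--     n = len(spike_indices)
--     i = 0
--     while i < n:
--         # scan ahead to the end of the current run
--         j = i
--         while j + 1 < n and spike_indices[j + 1] - spike_indices[j] <= max_gap:
--             j += 1
--         start, end = spike_indices[i], spike_indices[j]
--         events.append({"start": start, "end": end, "duration": end - start + 1})
--         i = j + 1
--     return events
-- ===== Notes on version B (the rewrite author's own statement) =====
-- stated objective: alternative
-- what changed: Instead of accumulating a mutable current-event dict element by element and flushing it on each large gap, B scans ahead with a nested loop to find the end index of each run and emits the complete event per run.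
import Mathlib
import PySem

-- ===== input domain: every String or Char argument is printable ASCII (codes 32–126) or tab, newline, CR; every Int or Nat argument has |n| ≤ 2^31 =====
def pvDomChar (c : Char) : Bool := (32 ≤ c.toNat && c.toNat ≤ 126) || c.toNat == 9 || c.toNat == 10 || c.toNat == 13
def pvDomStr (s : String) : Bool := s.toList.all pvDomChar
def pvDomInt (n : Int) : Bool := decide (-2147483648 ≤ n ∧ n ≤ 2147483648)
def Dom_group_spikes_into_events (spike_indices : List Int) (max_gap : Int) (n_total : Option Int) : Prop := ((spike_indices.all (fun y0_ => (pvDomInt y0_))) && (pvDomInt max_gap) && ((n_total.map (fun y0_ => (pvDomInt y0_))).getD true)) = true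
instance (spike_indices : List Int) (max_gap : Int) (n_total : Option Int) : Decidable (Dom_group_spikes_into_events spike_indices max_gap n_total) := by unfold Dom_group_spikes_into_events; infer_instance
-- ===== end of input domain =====

-- ===== PORT A =====
-- B differs from A only in decomposition (run-scanning vs element-wise accumulation); same values everywhere.

-- the for-loop of A: state = (accumulated events, current start, current end)
def gsieLoop (max_gap : Int) : List Int → List (List (String × Int)) → Int → Int → List (List (String × Int))
  | [], events, curS, curE =>
      events ++ [[("start", curS), ("end", curE), ("duration", curE - curS + 1)]]
  | idx :: rest, events, curS, curE =>
      if idx - curE ≤ max_gap then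
        gsieLoop max_gap rest events curS idx
      else
        gsieLoop max_gap rest
          (events ++ [[("start", curS), ("end", curE), ("duration", curE - curS + 1)]]) idx idx

def group_spikes_into_events (spike_indices : List Int) (max_gap : Int) (n_total : Option Int) : List (List (String × Int)) :=
  match spike_indices with
  | [] => []
  | x :: rest =>
      let mg : Int :=
        match n_total with
        | none => max_gap
        | some n => if n < 20 then 1 else if n < 30 then min max_gap 2 else max_gap
      gsieLoop mg rest [] x x

-- ===== PORT B =====
-- the inner while loop of B: starting from current end e, extend the run while the gap is small;
-- returns (end of run, remaining indices after the run)
def gsieRun (max_gap : Int) : Int → List Int → Int × List Int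
  | e, [] => (e, [])
  | e, y :: t => if y - e ≤ max_gap then gsieRun max_gap y t else (e, y :: t)

theorem gsieRun_len (max_gap : Int) (e : Int) (l : List Int) :
    (gsieRun max_gap e l).2.length ≤ l.length := by
  induction l generalizing e with
  | nil => simp [gsieRun]
  | cons y t ih =>
      simp only [gsieRun]
      split
      · exact Nat.le_trans (ih y) (Nat.le_succ _)
      · exact Nat.le_refl _

-- the outer while loop of B: one event per run
def gsieEvents (max_gap : Int) : List Int → List (List (String × Int))
  | [] => []
  | x :: t =>
      let p := gsieRun max_gap x t
      [("start", x), ("end", p.1), ("duration", p.1 - x + 1)] :: gsieEvents max_gap p.2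
termination_by l => l.length
decreasing_by
  exact Nat.lt_succ_of_le (gsieRun_len _ _ _)

def group_spikes_into_events_alt (spike_indices : List Int) (max_gap : Int) (n_total : Option Int) : List (List (String × Int)) :=
  match spike_indices with
  | [] => []
  | _ :: _ =>
      let mg : Int :=
        match n_total with
        | none => max_gap
        | some n => if n < 20 then 1 else if n < 30 then min max_gap 2 else max_gap
      gsieEvents mg spike_indices

-- ===== PRECONDITION & SPEC =====
def Spec_group_spikes_into_events (spike_indices : List Int) (max_gap : Int) (n_total : Option Int) (out : List (List (String × Int))) : Prop := out = group_spikes_into_events_alt spike_indices max_gap n_total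
instance (spike_indices : List Int) (max_gap : Int) (n_total : Option Int) (out : List (List (String × Int))) : Decidable (Spec_group_spikes_into_events spike_indices max_gap n_total out) := by unfold Spec_group_spikes_into_events; infer_instance

-- ===== CLAIM (what is proved, stated in full; the proofs are below) =====
def Claim_equal_group_spikes_into_events : Prop := ∀ (spike_indices : List Int) (max_gap : Int) (n_total : Option Int), Dom_group_spikes_into_events spike_indices max_gap n_total → Spec_group_spikes_into_events spike_indices max_gap n_total (group_spikes_into_events spike_indices max_gap n_total)

-- ===== LEMMAS AND PROOFS =====

-- A's loop, run from state (events, s, e), appends the event of the run that currently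
-- contains e followed by B's events of whatever remains after that run.
theorem gsieLoop_eq (mg : Int) (rest : List Int) (events : List (List (String × Int))) (s e : Int) :
    gsieLoop mg rest events s e =
      events ++ ([("start", s), ("end", (gsieRun mg e rest).1),
                  ("duration", (gsieRun mg e rest).1 - s + 1)]
                 :: gsieEvents mg (gsieRun mg e rest).2) := by
  induction rest generalizing events s e with
  | nil => simp [gsieLoop, gsieRun, gsieEvents]
  | cons y t ih =>
      simp only [gsieLoop, gsieRun]
      split
      · exact ih ..
      · rw [ih]
        simp [gsieEvents, List.append_assoc]

-- ===== VERDICT (by name: the statement is the Claim_ definition above) =====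
theorem group_spikes_into_events_spec : Claim_equal_group_spikes_into_events := by
  intro spike_indices max_gap n_total _
  unfold Spec_group_spikes_into_events group_spikes_into_events group_spikes_into_events_alt
  cases spike_indices with
  | nil => rfl
  | cons x rest =>
      simp only [gsieLoop_eq, List.nil_append]
      rw [gsieEvents]
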